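-- pv_equiv track=rewrite | github.com/maxiwebs/CorsiBot | scripts/protocolos/mayoresDiferencias.py | cantLetrasDeSeq1EnSeq2
-- ===== SOURCE A (Python) =====
-- def cantLetrasDeSeq1EnSeq2(seq1,seq2):
--     letters = list(seq1)
--
--     cantLetras = 0
--     for letter in letters:
--         apariciones = (str(seq2)).count(letter)
--         #Si la letra aparece alguna vez, incremento
--         if apariciones > 0:
--             cantLetras+=1
--
--     return cantLetras
-- ===== SOURCE B (Python) =====
-- from collections import Counter
--
-- def cantLetrasDeSeq1EnSeq2(seq1, seq2):
--     s = str(seq2)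
--     total = 0
--     for element, count in Counter(seq1).items():
--         if element in s:
--             total += count
--     return total
-- ===== Notes on version B (the rewrite author's own statement) =====
-- stated objective: faster
-- what changed: B builds a Counter of seq1 once and does one membership test per DISTINCT character, adding its multiplicity, instead of A's full scan of str(seq2) (via str.count) for every position of seq1.
import Mathlib
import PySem

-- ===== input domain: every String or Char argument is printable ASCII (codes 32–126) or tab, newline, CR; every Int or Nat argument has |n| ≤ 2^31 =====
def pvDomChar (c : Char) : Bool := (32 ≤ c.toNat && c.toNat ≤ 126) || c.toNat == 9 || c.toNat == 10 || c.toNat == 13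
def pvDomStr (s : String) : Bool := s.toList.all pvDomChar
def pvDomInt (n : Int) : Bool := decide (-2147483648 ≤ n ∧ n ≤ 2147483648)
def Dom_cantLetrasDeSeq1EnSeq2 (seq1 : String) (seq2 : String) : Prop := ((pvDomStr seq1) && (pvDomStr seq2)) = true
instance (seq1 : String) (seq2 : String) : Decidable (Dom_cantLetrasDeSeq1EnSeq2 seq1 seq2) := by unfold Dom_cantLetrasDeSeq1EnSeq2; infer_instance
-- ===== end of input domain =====

-- B replaces A's per-position scan of str(seq2) (one str.count per character of seq1) by a Counter
-- of seq1 with one membership test per DISTINCT character, adding its multiplicity (objective: faster).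

-- ===== PORT A =====
def cantLetrasDeSeq1EnSeq2 (seq1 : String) (seq2 : String) : Int :=
  let letters := seq1.toList
  letters.foldl (fun cantLetras letter =>
    let apariciones := PySem.Str.count seq2 (String.singleton letter)
    if apariciones > 0 then cantLetras + 1 else cantLetras) 0

-- ===== PORT B =====
def cantLetrasDeSeq1EnSeq2_alt (seq1 : String) (seq2 : String) : Int :=
  let s := seq2
  (PySem.Dict.counter seq1.toList).items.foldl
    (fun total kv =>
      if PySem.Str.isIn (String.singleton kv.1) s = true then total + kv.2 else total) 0

-- ===== PRECONDITION & SPEC =====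
def Spec_cantLetrasDeSeq1EnSeq2 (seq1 : String) (seq2 : String) (out : Int) : Prop := out = cantLetrasDeSeq1EnSeq2_alt seq1 seq2
instance (seq1 : String) (seq2 : String) (out : Int) : Decidable (Spec_cantLetrasDeSeq1EnSeq2 seq1 seq2 out) := by unfold Spec_cantLetrasDeSeq1EnSeq2; infer_instance

-- ===== CLAIM (what is proved, stated in full; the proofs are below) =====
def Claim_equal_cantLetrasDeSeq1EnSeq2 : Prop := ∀ (seq1 : String) (seq2 : String), Dom_cantLetrasDeSeq1EnSeq2 seq1 seq2 → Spec_cantLetrasDeSeq1EnSeq2 seq1 seq2 (cantLetrasDeSeq1EnSeq2 seq1 seq2)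

-- ===== LEMMAS AND PROOFS =====

-- count.go with a singleton pattern counts the occurrences of that character
theorem countgo_singleton (c : Char) : ∀ (s : List Char) (acc : Nat),
    PySem.Chars.count.go [c] s.length s acc = acc + s.count c := by
  intro s
  induction s with
  | nil => intro acc; simp [PySem.Chars.count.go]
  | cons h t ih =>
    intro acc
    simp only [List.length_cons, PySem.Chars.count.go, List.isPrefixOf, List.count_cons]
    by_cases hc : c == h
    · simp [hc, ih]
      have hch : h = c := (beq_iff_eq.mp hc).symm
      simp [hch]
      omega
    · simp [hc, ih]
      simp [beq_iff_eq] at hc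
      simp [Ne.symm hc]

-- s.count(c) > 0 for a single character c is exactly membership of c in s
theorem count_singleton_pos (c : Char) (s : List Char) :
    0 < PySem.Chars.count s [c] ↔ c ∈ s := by
  simp [PySem.Chars.count, countgo_singleton, List.count_pos_iff]

-- a sum of "if p k then f k else 0" over a list is the sum of f over its p-filter
theorem sum_map_ite_filter (p : Char → Bool) (f : Char → Nat) (m : List Char) :
    (m.map (fun k => if p k then (f k : Int) else 0)).sum
      = (((m.filter p).map f).sum : Nat) := by
  induction m with
  | nil => simp
  | cons h t ih =>
    by_cases hp : p h <;> simp [hp, ih]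

theorem portA_eq_portB (seq1 seq2 : String) :
    cantLetrasDeSeq1EnSeq2 seq1 seq2 = cantLetrasDeSeq1EnSeq2_alt seq1 seq2 := by
  unfold cantLetrasDeSeq1EnSeq2 cantLetrasDeSeq1EnSeq2_alt
  simp only [PySem.Str.count_eq, PySem.Str.isIn_eq, String.toList_singleton]
  rw [PySem.Dict.items_counter]
  set l := seq1.toList with hl
  set s := seq2.toList with hs
  -- A side: a 0/1 fold is countP
  rw [PySem.List.foldl_ite_add_one (fun c => PySem.Chars.count s [c] > 0) l 0]
  -- the two membership tests are the same Bool
  have hpq : ∀ c : Char, decide (PySem.Chars.count s [c] > 0) = PySem.Chars.isIn [c] s := by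
    intro c
    by_cases h : [c] <:+: s
    · simp [count_singleton_pos, (List.singleton_infix_iff c s).mp h,
        (PySem.Chars.isIn_iff_infix [c] s).mpr h]
    · have h1 : ¬ c ∈ s := fun hm => h ((List.singleton_infix_iff c s).mpr hm)
      simp [count_singleton_pos, h1, (PySem.Chars.isIn_eq_false_iff [c] s).mpr h]
  -- B side: fold over the counter items is a sum over the distinct characters
  rw [List.foldl_map]
  have hbody : (fun (total : Int) (k : Char) =>
      if PySem.Chars.isIn [k] s = true then total + (List.count k l : Int) else total)
      = fun total k => total + (if PySem.Chars.isIn [k] s = true then (List.count k l : Int) else 0) := by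
    funext total k
    by_cases h : PySem.Chars.isIn [k] s = true <;> simp [h]
  rw [hbody, PySem.List.foldl_add]
  -- sum over Set.ofList = sum over dedup (both list the distinct elements, order irrelevant)
  have hperm : (PySem.Set.ofList l : List Char).Perm l.dedup := by
    rw [List.perm_ext_iff_of_nodup (PySem.Set.nodup_ofList l) l.nodup_dedup]
    intro a
    rw [PySem.Set.mem_ofList, List.mem_dedup]
  rw [(hperm.map _).sum_eq,
    sum_map_ite_filter (fun k => PySem.Chars.isIn [k] s) (fun k => List.count k l) l.dedup,
    List.sum_map_count_dedup_filter_eq_countP (fun k => PySem.Chars.isIn [k] s) l]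
  simp only [hpq]

-- ===== VERDICT (by name: the statement is the Claim_ definition above) =====
theorem cantLetrasDeSeq1EnSeq2_spec : Claim_equal_cantLetrasDeSeq1EnSeq2 := by
  intro seq1 seq2 _
  unfold Spec_cantLetrasDeSeq1EnSeq2
  exact portA_eq_portB seq1 seq2
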